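-- pv_equiv track=rewrite | github.com/jameshallam93/aoc23 | 5/5-2.py | get_seed_ranges
-- ===== SOURCE A (Python) =====
-- def get_seed_ranges(seeds):
--     # takes a list of numbers and returns a list of pairs of numbers
--     pairs = []
--     pair = []
--     for i, s in enumerate(seeds):
--         pair.append(int(s))
--         if i % 2 == 0:
--             continue
--         else:
--             pairs.append(pair)
--             pair = []
--     return pairs
-- ===== SOURCE B (Python) =====
-- def get_seed_ranges(seeds):
--     # iterator-pairing idiom: consume the list two at a time
--     it = iter(seeds)
--     return [[int(a), int(b)] for a, b in zip(it, it)]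
-- ===== Notes on version B (the rewrite author's own statement) =====
-- stated objective: idiomatic
-- what changed: Replaces the enumerate loop with accumulator, parity test and reset by the standard iterator-pairing idiom zip(it, it), consuming the sequence two elements at a time.
import Mathlib
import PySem

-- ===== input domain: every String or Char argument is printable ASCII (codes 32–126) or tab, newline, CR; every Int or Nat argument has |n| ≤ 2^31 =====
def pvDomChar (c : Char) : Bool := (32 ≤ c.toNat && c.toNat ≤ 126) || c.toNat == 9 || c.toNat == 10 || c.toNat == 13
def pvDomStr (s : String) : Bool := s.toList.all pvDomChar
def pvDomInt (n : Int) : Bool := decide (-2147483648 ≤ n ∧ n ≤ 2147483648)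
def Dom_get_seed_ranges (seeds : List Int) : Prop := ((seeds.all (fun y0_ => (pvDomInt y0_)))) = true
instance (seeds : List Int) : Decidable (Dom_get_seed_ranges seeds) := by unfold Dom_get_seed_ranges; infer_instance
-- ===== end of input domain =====

-- B replaces A's enumerate loop (accumulator + parity test + reset) by pairing two at a time; equal on all inputs.
-- ===== PORT A =====
-- loop over enumerate(seeds) carrying (pairs, pair); int(s) on an int is the identity
def getSeedLoop : List (Int × Int) → List (List Int) × List Int → List (List Int) × List Int
  | [], st => st
  | (i, s) :: rest, (pairs, pair) =>
      let pair' := pair ++ [s]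
      if i % 2 == 0 then getSeedLoop rest (pairs, pair')
      else getSeedLoop rest (pairs ++ [pair'], [])

def get_seed_ranges (seeds : List Int) : List (List Int) :=
  (getSeedLoop (PySem.List.enumerate seeds) ([], [])).1

-- ===== PORT B =====
-- zip(it, it): consume the list two elements at a time
def get_seed_ranges_alt : List Int → List (List Int)
  | a :: b :: rest => [a, b] :: get_seed_ranges_alt rest
  | _ => []

-- ===== PRECONDITION & SPEC =====
def Spec_get_seed_ranges (seeds : List Int) (out : List (List Int)) : Prop := out = get_seed_ranges_alt seeds
instance (seeds : List Int) (out : List (List Int)) : Decidable (Spec_get_seed_ranges seeds out) := by unfold Spec_get_seed_ranges; infer_instance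

-- ===== CLAIM (what is proved, stated in full; the proofs are below) =====
def Claim_equal_get_seed_ranges : Prop := ∀ (seeds : List Int), Dom_get_seed_ranges seeds → Spec_get_seed_ranges seeds (get_seed_ranges seeds)

-- ===== LEMMAS AND PROOFS =====

-- ===== VERDICT (by name: the statement is the Claim_ definition above) =====
theorem loop_pairs (rest : List Int) : ∀ (i : Int) (pairs : List (List Int)), i % 2 = 0 →
    (getSeedLoop (PySem.List.enumerate rest i) (pairs, [])).1 = pairs ++ get_seed_ranges_alt rest := by
  induction rest using get_seed_ranges_alt.induct with
  | case1 a b rest ih =>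
      intro i pairs hi
      simp only [PySem.List.enumerate_cons, getSeedLoop, get_seed_ranges_alt]
      have h1 : (i % 2 == 0) = true := by simp [hi]
      have h2 : ((i + 1) % 2 == 0) = false := by
        simp only [beq_eq_false_iff_ne, ne_eq]; omega
      rw [h1, h2]
      simp only [Bool.false_eq_true, if_false, if_true, List.nil_append, List.singleton_append]
      rw [ih (i + 1 + 1) (pairs ++ [[a, b]]) (by omega)]
      simp
  | case2 xs h =>
      intro i pairs hi
      match xs, h with
      | [], _ =>
          simp [PySem.List.enumerate_nil, getSeedLoop, get_seed_ranges_alt]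
      | [a], _ =>
          simp only [PySem.List.enumerate_cons, PySem.List.enumerate_nil, getSeedLoop]
          have h1 : (i % 2 == 0) = true := by simp [hi]
          rw [h1]
          simp [get_seed_ranges_alt]
      | a :: b :: rest, h =>
          exact absurd rfl (fun heq => h a b rest heq)
theorem get_seed_ranges_spec : Claim_equal_get_seed_ranges := by
  intro seeds _
  unfold Spec_get_seed_ranges get_seed_ranges
  rw [loop_pairs seeds 0 [] (by norm_num)]
  simp
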